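-- pv_equiv track=rewrite | github.com/lilsweetcaligula/Online-Judges | hackerrank/algorithms/strings/easy/beautiful_binary_string/py/solution.py | solution
-- ===== SOURCE A (Python) =====
-- def solution(s):
--     pattern   = '010'
--     positions = []
--     index     = s.find(pattern)
--
--     while index >= 0:
--         positions.append(index)
--         index = s.find(pattern, index + 1)
--
--     count = 0
--     index = 0
--
--     while index < len(positions):
--         count += 1
--
--         if index + 1 < len(positions) and abs(positions[index] - positions[index + 1]) < len(pattern):
--             index += 1
--
--         index += 1
--
--     return count
-- ===== SOURCE B (Python) =====
-- def solution(s):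
--     count = 0
--     i = 0
--     while i + 3 <= len(s):
--         if s[i:i+3] == '010':
--             count += 1
--             i += 3
--         else:
--             i += 1
--     return count
-- ===== Notes on version B (the rewrite author's own statement) =====
-- stated objective: simpler
-- what changed: Replaces A's two-phase scheme (collect all overlapping '010' positions via repeated str.find, then a pairing loop that skips a neighbouring position closer than 3) with a single greedy left-to-right scan that counts a match and jumps 3 ahead.
import Mathlib
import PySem

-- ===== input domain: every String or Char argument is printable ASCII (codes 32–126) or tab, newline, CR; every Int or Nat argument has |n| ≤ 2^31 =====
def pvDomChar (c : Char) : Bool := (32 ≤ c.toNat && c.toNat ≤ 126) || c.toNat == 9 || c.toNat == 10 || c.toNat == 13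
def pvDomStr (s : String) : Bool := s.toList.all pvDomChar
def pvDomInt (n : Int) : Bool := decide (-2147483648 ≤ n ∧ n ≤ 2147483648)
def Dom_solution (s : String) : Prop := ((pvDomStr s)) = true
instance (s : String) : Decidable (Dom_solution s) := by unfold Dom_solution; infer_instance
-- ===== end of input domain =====

-- B replaces A's collect-all-'010'-positions-then-pair scheme with one greedy scan (count and jump 3 on a match); objective: simpler.

-- ===== PORT A =====
-- pattern = '010'
def solutionPat : List Char := ['0', '1', '0']

-- the first while loop: collect the indices of every occurrence of '010' via repeated find
-- (fuel = |s| + 1 only makes the recursion total; the loop runs at most that often, see posLoop_eq)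
def posLoop (cs : List Char) : Nat → Int → List Int
  | 0, _ => []
  | f + 1, index =>
    if 0 ≤ index then index :: posLoop cs f (PySem.Chars.findFrom cs solutionPat (index + 1) none)
    else []

-- the second while loop over `positions` (count += 1; skip the next position if it is < 3 away)
def pairLoop : List Int → Int
  | [] => 0
  | [_] => 1
  | p :: q :: rest => if |p - q| < 3 then 1 + pairLoop rest else 1 + pairLoop (q :: rest)

def solution (s : String) : Int :=
  pairLoop (posLoop s.toList (s.toList.length + 1) (PySem.Chars.find s.toList solutionPat))

-- ===== PORT B =====
-- the single while loop of Source B; s[i:i+3] = (cs.drop i).take 3 since 0 ≤ i (PySem.List.slice_toNat)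
def solAltLoop (cs : List Char) (i : Nat) : Int :=
  if h : i + 3 ≤ cs.length then
    if (cs.drop i).take 3 = ['0', '1', '0'] then 1 + solAltLoop cs (i + 3)
    else solAltLoop cs (i + 1)
  else 0
termination_by cs.length - i

def solution_alt (s : String) : Int := solAltLoop s.toList 0

-- ===== PRECONDITION & SPEC =====
def Spec_solution (s : String) (out : Int) : Prop := out = solution_alt s
instance (s : String) (out : Int) : Decidable (Spec_solution s out) := by unfold Spec_solution; infer_instance

-- ===== CLAIM (what is proved, stated in full; the proofs are below) =====
def Claim_equal_solution : Prop := ∀ (s : String), Dom_solution s → Spec_solution s (solution s)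

-- ===== LEMMAS AND PROOFS =====

-- The sorted list of ALL indices k' ≥ k at which '010' occurs in cs
def M (cs : List Char) (k : Nat) : List Nat :=
  if cs.length < k + 3 then []
  else if (cs.drop k).take 3 = ['0', '1', '0'] then k :: M cs (k + 1)
  else M cs (k + 1)
termination_by cs.length + 3 - k
decreasing_by all_goals omega

theorem M_mem {cs : List Char} {k i : Nat} (h : i ∈ M cs k) :
    k ≤ i ∧ (cs.drop i).take 3 = ['0', '1', '0'] := by
  revert h
  induction k using M.induct (cs := cs) with
  | case1 k hlt => intro h; simp [M, hlt] at h
  | case2 k hlt hm ih =>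
    intro h
    rw [M, if_neg hlt, if_pos hm] at h
    rcases List.mem_cons.mp h with rfl | h'
    · exact ⟨le_refl _, hm⟩
    · exact ⟨Nat.le_of_succ_le (ih h').1, (ih h').2⟩
  | case3 k hlt hm ih =>
    intro h
    rw [M, if_neg hlt, if_neg hm] at h
    exact ⟨Nat.le_of_succ_le (ih h).1, (ih h).2⟩

theorem M_len {cs : List Char} {k : Nat} (hk : k ≤ cs.length) :
    (M cs k).length + k ≤ cs.length := by
  revert hk
  induction k using M.induct (cs := cs) with
  | case1 k hlt => intro hk; rw [M, if_pos hlt]; simpa using hk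
  | case2 k hlt hm ih =>
    intro hk
    rw [M, if_neg hlt, if_pos hm]
    have := ih (by omega)
    simp only [List.length_cons]
    omega
  | case3 k hlt hm ih =>
    intro hk
    rw [M, if_neg hlt, if_neg hm]
    have := ih (by omega)
    omega

-- '010' cannot occur at two consecutive indices
theorem M_no_consec {cs : List Char} {k : Nat} (h : (cs.drop k).take 3 = ['0', '1', '0']) :
    ¬ (cs.drop (k + 1)).take 3 = ['0', '1', '0'] := by
  intro h'
  have e1 : (cs.drop k)[1]? = some '1' := by
    have : ((cs.drop k).take 3)[1]? = some '1' := by rw [h]; rfl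
    rwa [List.getElem?_take_of_lt (by omega)] at this
  have e2 : (cs.drop (k + 1))[0]? = some '0' := by
    have : ((cs.drop (k + 1)).take 3)[0]? = some '0' := by rw [h']; rfl
    rwa [List.getElem?_take_of_lt (by omega)] at this
  rw [List.getElem?_drop] at e1 e2
  simp at e1 e2
  rw [e1] at e2
  exact absurd (Option.some.inj e2) (by decide)

theorem match_bound {cs : List Char} {k : Nat} (h : (cs.drop k).take 3 = ['0', '1', '0']) :
    k + 3 ≤ cs.length := by
  have h3 : ((cs.drop k).take 3).length = 3 := by rw [h]; rfl
  simp [List.length_take, List.length_drop] at h3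
  omega

-- unfolding equations for M, phrased on the match test
theorem M_nomatch {cs : List Char} {k : Nat} (hm : ¬ (cs.drop k).take 3 = ['0', '1', '0']) :
    M cs k = M cs (k + 1) := by
  by_cases hlt : cs.length < k + 3
  · rw [M, if_pos hlt, M]
    rw [if_pos (by omega)]
  · rw [M, if_neg hlt, if_neg hm]

theorem M_match {cs : List Char} {k : Nat} (hm : (cs.drop k).take 3 = ['0', '1', '0']) :
    M cs k = k :: M cs (k + 1) := by
  have := match_bound hm
  rw [M, if_neg (by omega), if_pos hm]

theorem M_eq_of_no_match {cs : List Char} (d : Nat) :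
    ∀ k, (∀ j, k ≤ j → j < k + d → ¬ (cs.drop j).take 3 = ['0', '1', '0']) →
      M cs k = M cs (k + d) := by
  induction d with
  | zero => intro k _; rfl
  | succ n ih =>
    intro k h
    rw [M_nomatch (h k (le_refl _) (by omega))]
    rw [ih (k + 1) (fun j hj1 hj2 => h j (by omega) (by omega))]
    congr 1
    omega

-- prefix-at-j ↔ the match test at j
theorem prefix_iff_match (cs : List Char) (j : Nat) :
    solutionPat <+: cs.drop j ↔ (cs.drop j).take 3 = ['0', '1', '0'] := by
  rw [List.prefix_iff_eq_take]
  have h3 : solutionPat.length = 3 := rfl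
  rw [h3]
  exact ⟨fun h => h.symm, fun h => h.symm⟩

theorem M_nil_of_no_infix {cs : List Char} {k : Nat}
    (h : ¬ solutionPat <:+: cs.drop k) : M cs k = [] := by
  rcases he : M cs k with _ | ⟨j, rest⟩
  · rfl
  · exfalso
    have hj := M_mem (he ▸ List.mem_cons_self)
    apply h
    have hpre : solutionPat <+: cs.drop j := (prefix_iff_match cs j).mpr hj.2
    have hdd : cs.drop j = (cs.drop k).drop (j - k) := by
      rw [List.drop_drop]; congr 1; omega
    rw [hdd] at hpre
    exact hpre.isInfix.trans (List.drop_suffix _ _).isInfix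

-- the find loop computes exactly M
theorem posLoop_eq (cs : List Char) (f : Nat) :
    ∀ k : Nat, k ≤ cs.length → (M cs k).length < f →
      posLoop cs f (PySem.Chars.findFrom cs solutionPat (k : Int) none) =
        (M cs k).map Int.ofNat := by
  induction f with
  | zero => intro k _ hf; omega
  | succ f ih =>
    intro k hk hf
    by_cases hneg : PySem.Chars.findFrom cs solutionPat (k : Int) none = -1
    · have hni : ¬ solutionPat <:+: cs.drop k :=
        (PySem.Chars.findFrom_natCast_eq_neg_one_iff cs solutionPat k hk).mp hneg
      rw [hneg, M_nil_of_no_infix hni]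
      simp [posLoop]
    · obtain ⟨hle, hpre, hmin⟩ := PySem.Chars.findFrom_natCast_spec cs solutionPat k hk hneg
      set r := PySem.Chars.findFrom cs solutionPat (k : Int) none with hr
      have hr0 : 0 ≤ r := le_trans (by exact_mod_cast Int.natCast_nonneg k) hle
      have hrk : k ≤ r.toNat := by omega
      have hmatch : (cs.drop r.toNat).take 3 = ['0', '1', '0'] := (prefix_iff_match cs _).mp hpre
      have hrlen : r.toNat + 3 ≤ cs.length := match_bound hmatch
      have hM : M cs k = r.toNat :: M cs (r.toNat + 1) := by
        have hno := M_eq_of_no_match (cs := cs) (r.toNat - k) k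
          (fun j hj1 hj2 hmj => hmin j hj1 (by omega)
            ((prefix_iff_match cs j).mpr hmj))
        rw [Nat.add_sub_cancel' hrk] at hno
        rw [hno, M_match hmatch]
      rw [posLoop, if_pos hr0]
      have hcast : r + 1 = ((r.toNat + 1 : Nat) : Int) := by omega
      have hrec := ih (r.toNat + 1) (by omega) (by rw [hM] at hf; simp at hf; omega)
      rw [hcast, hrec, hM, List.map_cons]
      congr 1
      simp only [Int.ofNat_eq_natCast]
      omega

-- the central equivalence: A's pairing loop on M equals B's greedy scan
theorem pair_eq_greedy (cs : List Char) :
    ∀ k : Nat, pairLoop ((M cs k).map Int.ofNat) = solAltLoop cs k := by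
  have key : ∀ d k : Nat, cs.length + 3 - k ≤ d →
      pairLoop ((M cs k).map Int.ofNat) = solAltLoop cs k := by
    intro d
    induction d with
    | zero =>
      intro k hd
      have hlt : cs.length < k + 3 := by omega
      rw [M, if_pos hlt, solAltLoop, dif_neg (by omega)]
      rfl
    | succ d ih =>
      intro k hd
      by_cases hlen : k + 3 ≤ cs.length
      · by_cases hm : (cs.drop k).take 3 = ['0', '1', '0']
        · -- match at k: B counts 1 and jumps to k+3
          have hB : solAltLoop cs k = 1 + solAltLoop cs (k + 3) := by
            rw [solAltLoop, dif_pos hlen, if_pos hm]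
          have hM1 : M cs (k + 1) = M cs (k + 2) := M_nomatch (M_no_consec hm)
          rw [M_match hm, hM1, hB]
          by_cases hm2 : (cs.drop (k + 2)).take 3 = ['0', '1', '0']
          · -- overlapping match at k+2: A pairs them (|k-(k+2)| = 2 < 3)
            have e23 : M cs (k + 2 + 1) = M cs (k + 3) := by norm_num
            rw [M_match hm2, e23, List.map_cons, List.map_cons, pairLoop,
              if_pos (by simp only [Int.ofNat_eq_natCast]; rw [abs_sub_lt_iff]; push_cast; omega),
              ih (k + 3) (by omega)]
          · have hM2 : M cs (k + 2) = M cs (k + 3) := M_nomatch hm2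
            rw [hM2, List.map_cons]
            rcases he : M cs (k + 3) with _ | ⟨q, rest⟩
            · have h0 : solAltLoop cs (k + 3) = 0 := by
                rw [← ih (k + 3) (by omega), he]; rfl
              rw [h0]
              simp [pairLoop]
            · have hq : k + 3 ≤ q := (M_mem (he ▸ List.mem_cons_self)).1
              rw [List.map_cons, pairLoop,
                if_neg (by simp only [Int.ofNat_eq_natCast]; rw [abs_sub_lt_iff]; omega),
                ← List.map_cons, ← he, ih (k + 3) (by omega)]
        · rw [M_nomatch hm, solAltLoop, dif_pos hlen, if_neg hm, ih (k + 1) (by omega)]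
      · rw [M, if_pos (by omega), solAltLoop, dif_neg hlen]
        rfl
  exact fun k => key (cs.length + 3 - k) k (le_refl _)

-- ===== VERDICT (by name: the statement is the Claim_ definition above) =====
theorem solution_spec : Claim_equal_solution := by
  intro s _
  unfold Spec_solution solution solution_alt
  have h0 : PySem.Chars.find s.toList solutionPat =
      PySem.Chars.findFrom s.toList solutionPat ((0 : Nat) : Int) none := by
    rw [Nat.cast_zero, PySem.Chars.findFrom_zero]
  rw [h0, posLoop_eq s.toList (s.toList.length + 1) 0 (Nat.zero_le _)
    (by have := M_len (cs := s.toList) (k := 0) (Nat.zero_le _); omega)]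
  exact pair_eq_greedy s.toList 0
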